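-- pv_equiv track=rewrite | github.com/vkorir/code-time | leetcode/valid_palindrome_one_delete.py | is_palind
-- ===== SOURCE A (Python) =====
-- def is_palind(s, removed):
-- 	i, j = 0, len(s) - 1
--
-- 	while i < j:
-- 		if i == removed:
-- 			i += 1
-- 		elif j == removed:
-- 			j -= 1
-- 		elif s[i] != s[j]:
-- 			return False
-- 		else:
-- 			i += 1
-- 			j -= 1
-- 	return True
-- ===== SOURCE B (Python) =====
-- def is_palind(s, removed):
--     t = s if (removed < 0 or removed >= len(s)) else s[:removed] + s[removed + 1:]
--     return t == t[::-1]
-- ===== Notes on version B (the rewrite author's own statement) =====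
-- stated objective: idiomatic
-- what changed: A walks two pointers inward, skipping whichever pointer equals `removed`; B builds the deleted string once with slicing (guarding out-of-range `removed`) and checks palindromicity by comparing it with its reversed copy.
import Mathlib
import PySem

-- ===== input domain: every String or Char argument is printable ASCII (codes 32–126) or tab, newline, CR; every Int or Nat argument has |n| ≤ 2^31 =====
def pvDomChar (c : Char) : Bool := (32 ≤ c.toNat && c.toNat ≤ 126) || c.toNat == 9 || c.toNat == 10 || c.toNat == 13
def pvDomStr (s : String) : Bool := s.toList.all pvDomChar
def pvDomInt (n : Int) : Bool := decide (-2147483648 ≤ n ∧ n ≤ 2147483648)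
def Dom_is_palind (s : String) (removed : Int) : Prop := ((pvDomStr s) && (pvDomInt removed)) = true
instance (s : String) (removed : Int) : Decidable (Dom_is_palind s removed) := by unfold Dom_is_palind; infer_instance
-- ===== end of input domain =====

-- B replaces A's two-pointer walk that skips index `removed` by building the deleted
-- string once and comparing it with its reversed copy (objective: idiomatic; return
-- value only, no mutation involved).

-- ===== PORT A =====
-- the while loop of A: state (i, j), literal branch order
def isPalindLoopA (l : List Char) (removed i j : Int) : Bool :=
  if _h : i < j then
    if i = removed then isPalindLoopA l removed (i + 1) j
    else if j = removed then isPalindLoopA l removed i (j - 1)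
    else if PySem.List.pyGet? l i ≠ PySem.List.pyGet? l j then false
    else isPalindLoopA l removed (i + 1) (j - 1)
  else true
termination_by (j - i).toNat
decreasing_by all_goals omega

def is_palind (s : String) (removed : Int) : Bool :=
  isPalindLoopA s.toList removed 0 (PySem.Str.len s - 1)

-- ===== PORT B =====
-- Source B: t = s if (removed < 0 or removed >= len(s)) else s[:removed] + s[removed+1:]
--       return t == t[::-1]         (t[::-1] is t.reverse: PySem.List.slice?_none_none_neg_one)
def is_palind_alt (s : String) (removed : Int) : Bool :=
  let t : List Char :=
    if removed < 0 ∨ removed ≥ PySem.Str.len s then s.toList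
    else PySem.List.slice s.toList none (some removed) ++
         PySem.List.slice s.toList (some (removed + 1)) none
  decide (t = t.reverse)

-- ===== PRECONDITION & SPEC =====
def Spec_is_palind (s : String) (removed : Int) (out : Bool) : Prop := out = is_palind_alt s removed
instance (s : String) (removed : Int) (out : Bool) : Decidable (Spec_is_palind s removed out) := by unfold Spec_is_palind; infer_instance

-- ===== CLAIM (what is proved, stated in full; the proofs are below) =====
def Claim_equal_is_palind : Prop := ∀ (s : String) (removed : Int), Dom_is_palind s removed → Spec_is_palind s removed (is_palind s removed)

-- ===== LEMMAS AND PROOFS =====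

-- the segment l[i..j] (inclusive), as a list
def segN (l : List Char) (i j : Nat) : List Char := (l.drop i).take (j + 1 - i)

-- the segment with index `r` of l erased when i ≤ r ≤ j
def segE (l : List Char) (r : Int) (i j : Nat) : List Char :=
  if (i : Int) ≤ r ∧ r ≤ (j : Int) then (segN l i j).eraseIdx (r.toNat - i) else segN l i j

lemma short_palind {t : List Char} (h : t.length ≤ 1) : t = t.reverse := by
  match t, h with
  | [], _ => rfl
  | [a], _ => rfl

lemma sandwich (a b : Char) (xs : List Char) :
    (a :: xs ++ [b] = (a :: xs ++ [b]).reverse) ↔ (a = b ∧ xs = xs.reverse) := by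
  constructor
  · intro h
    simp only [List.reverse_cons, List.reverse_append, List.reverse_cons, List.reverse_nil,
      List.nil_append, List.cons_append] at h
    obtain ⟨hab, h2⟩ := List.cons.inj h
    have := List.append_inj h2 (by simp)
    exact ⟨hab, this.1⟩
  · rintro ⟨rfl, hx⟩
    conv_lhs => rw [hx]
    simp

lemma segN_cons {l : List Char} {i j : Nat} (hij : i < j) (hj : j < l.length) :
    segN l i j = l[i] :: segN l (i + 1) j := by
  unfold segN
  rw [show j + 1 - i = (j - i) + 1 by omega, show j + 1 - (i + 1) = j - i by omega]
  rw [List.drop_eq_getElem_cons (show i < l.length by omega), List.take_succ_cons]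

lemma segN_len {l : List Char} {i j : Nat} (hj : j < l.length) :
    (segN l i j).length = j + 1 - i := by
  unfold segN
  simp
  omega

lemma segN_snoc {l : List Char} {i j : Nat} (hij : i < j) (hj : j < l.length) :
    segN l i j = segN l i (j - 1) ++ [l[j]] := by
  unfold segN
  rw [show j - 1 + 1 - i = j - i by omega, show j + 1 - i = (j - i) + 1 by omega,
    List.take_add_one]
  have h2 : (l.drop i)[j - i]? = some l[j] := by
    rw [List.getElem?_drop, show i + (j - i) = j by omega]
    exact List.getElem?_eq_getElem hj
  simp [h2]

lemma segN_ends {l : List Char} {i j : Nat} (hij : i < j) (hj : j < l.length) :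
    segN l i j = l[i] :: segN l (i + 1) (j - 1) ++ [l[j]] := by
  rw [segN_cons hij hj]
  by_cases h : i + 1 < j
  · rw [segN_snoc h hj]
    simp
  · have hji : j = i + 1 := by omega
    subst hji
    have h0 : segN l (i + 1) (i + 1 - 1) = [] := by
      unfold segN
      rw [show i + 1 - 1 + 1 - (i + 1) = 0 by omega]
      rfl
    rw [h0]
    unfold segN
    rw [show i + 1 + 1 - (i + 1) = 1 by omega,
      List.drop_eq_getElem_cons (show i + 1 < l.length by omega), List.take_succ_cons]
    rfl

lemma eraseIdx_sandwich (a b : Char) (xs : List Char) (k : Nat) (h1 : 1 ≤ k)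
    (h2 : k ≤ xs.length) :
    (a :: xs ++ [b]).eraseIdx k = a :: xs.eraseIdx (k - 1) ++ [b] := by
  obtain ⟨k, rfl⟩ : ∃ m, k = m + 1 := ⟨k - 1, by omega⟩
  simp only [List.cons_append, List.eraseIdx_cons_succ, Nat.add_sub_cancel]
  rw [List.eraseIdx_append_of_lt_length (by omega)]

lemma segE_ends {l : List Char} {r : Int} {i j : Nat} (hij : i < j) (hj : j < l.length)
    (hir : (i : Int) ≠ r) (hjr : (j : Int) ≠ r) :
    segE l r i j = l[i] :: segE l r (i + 1) (j - 1) ++ [l[j]] := by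
  unfold segE
  by_cases hc : (i : Int) ≤ r ∧ r ≤ (j : Int)
  · have hrange : (i : Int) < r ∧ r < (j : Int) := by omega
    rw [if_pos hc, if_pos (by omega), segN_ends hij hj,
      eraseIdx_sandwich _ _ _ _ (by omega)
        (by rw [segN_len (show j - 1 < l.length by omega)]; omega),
      show r.toNat - i - 1 = r.toNat - (i + 1) by omega]
  · rw [if_neg hc, if_neg (by push_cast at hc ⊢; omega), segN_ends hij hj]

lemma segE_short {l : List Char} {r : Int} {i j : Nat} (hij : ¬ i < j) :
    segE l r i j = (segE l r i j).reverse := by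
  apply short_palind
  have hN : (segN l i j).length ≤ 1 := by
    unfold segN
    simp only [List.length_take, List.length_drop]
    omega
  unfold segE
  split
  · exact le_trans (List.length_eraseIdx_le ..) hN
  · exact hN

-- main invariant: the loop of A decides whether the (possibly erased) segment is a palindrome
lemma loop_eq_seg (l : List Char) (r : Int) :
    ∀ (n i j : Nat), j - i ≤ n → j < l.length →
      isPalindLoopA l r i j = decide (segE l r i j = (segE l r i j).reverse) := by
  intro n
  induction n with
  | zero =>
    intro i j hn hj
    rw [isPalindLoopA, dif_neg (by omega)]
    exact (decide_eq_true (segE_short (by omega))).symm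
  | succ n ih =>
    intro i j hn hj
    by_cases hij : i < j
    · rw [isPalindLoopA, dif_pos (by exact_mod_cast hij)]
      by_cases hir : (i : Int) = r
      · rw [if_pos hir]
        have hcall : ((i : Int) + 1) = ((i + 1 : Nat) : Int) := by omega
        rw [hcall, ih (i + 1) j (by omega) hj]
        have hseg : segE l r i j = segE l r (i + 1) j := by
          unfold segE
          rw [if_pos (by omega), if_neg (by omega), segN_cons hij hj,
            show r.toNat - i = 0 by omega, List.eraseIdx_cons_zero]
        rw [hseg]
      · rw [if_neg hir]
        by_cases hjr : (j : Int) = r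
        · rw [if_pos hjr]
          have hcall : ((j : Int) - 1) = ((j - 1 : Nat) : Int) := by omega
          rw [hcall, ih i (j - 1) (by omega) (by omega)]
          have hseg : segE l r i j = segE l r i (j - 1) := by
            unfold segE
            rw [if_pos (by omega), if_neg (by omega), segN_snoc hij hj,
              show r.toNat - i = (segN l i (j - 1)).length by rw [segN_len (by omega)]; omega,
              List.eraseIdx_append_of_length_le (le_refl _)]
            simp
          rw [hseg]
        · rw [if_neg hjr]
          have hgi : PySem.List.pyGet? l (i : Int) = some l[i] := by
            simp [PySem.List.pyGet?_natCast, List.getElem?_eq_getElem (by omega : i < l.length)]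
          have hgj : PySem.List.pyGet? l (j : Int) = some l[j] := by
            simp [PySem.List.pyGet?_natCast, List.getElem?_eq_getElem hj]
          have hends := segE_ends hij hj hir hjr
          by_cases hne : PySem.List.pyGet? l (i : Int) ≠ PySem.List.pyGet? l (j : Int)
          · rw [if_pos hne]
            have hab : l[i] ≠ l[j] := by
              intro h
              exact hne (by rw [hgi, hgj, h])
            symm
            rw [decide_eq_false_iff_not, hends]
            intro h
            exact hab ((sandwich _ _ _).mp h).1
          · rw [if_neg hne]
            push_neg at hne
            have hab : l[i] = l[j] := by
              rw [hgi, hgj] at hne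
              exact Option.some.inj hne
            have hcall1 : ((i : Int) + 1) = ((i + 1 : Nat) : Int) := by omega
            have hcall2 : ((j : Int) - 1) = ((j - 1 : Nat) : Int) := by omega
            rw [hcall1, hcall2, ih (i + 1) (j - 1) (by omega) (by omega), hends]
            have := sandwich l[i] l[j] (segE l r (i + 1) (j - 1))
            rw [hab] at this ⊢
            simp only [this]
            simp
    · rw [isPalindLoopA, dif_neg (by omega)]
      exact (decide_eq_true (segE_short hij)).symm

theorem is_palind_eq (s : String) (removed : Int) :
    is_palind s removed = is_palind_alt s removed := by
  unfold is_palind is_palind_alt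
  rw [PySem.Str.len_eq]
  dsimp only
  set l := s.toList with hl
  rcases Nat.eq_zero_or_pos l.length with hz | hpos
  · have hnil : l = [] := List.eq_nil_of_length_eq_zero hz
    rw [isPalindLoopA, dif_neg (by rw [hz]; omega)]
    rw [if_pos (by rw [hz]; omega)]
    simp [hnil]
  · have hcast : (l.length : Int) - 1 = ((l.length - 1 : Nat) : Int) := by omega
    have hmain := loop_eq_seg l removed (l.length - 1) 0 (l.length - 1) (by omega) (by omega)
    rw [Nat.cast_zero] at hmain
    rw [hcast, hmain]
    by_cases hout : removed < 0 ∨ removed ≥ (l.length : Int)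
    · rw [if_pos hout]
      have hseg : segE l removed 0 (l.length - 1) = l := by
        unfold segE segN
        rw [if_neg (by omega)]
        simp
        omega
      rw [hseg]
    · rw [if_neg hout]
      push_neg at hout
      have hseg : segE l removed 0 (l.length - 1) = l.take removed.toNat ++ l.drop (removed.toNat + 1) := by
        unfold segE segN
        rw [if_pos (by omega)]
        rw [show l.length - 1 + 1 - 0 = l.length by omega, List.drop_zero, List.take_length,
          Nat.sub_zero, List.eraseIdx_eq_take_drop_succ]
      rw [hseg, PySem.List.slice_to l (by omega), PySem.List.slice_from l (by omega),
        show (removed + 1).toNat = removed.toNat + 1 by omega]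

-- ===== VERDICT (by name: the statement is the Claim_ definition above) =====
theorem is_palind_spec : Claim_equal_is_palind := by
  intro s removed _
  unfold Spec_is_palind
  exact is_palind_eq s removed
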